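-- pv_equiv track=rewrite | github.com/26516515111/Project | rag_app/langGraphy/pipeline.py | _next_node_id
-- ===== SOURCE A (Python) =====
-- from typing import Any, TypedDict
--
-- def _next_node_id(selected_nodes: list[dict[str, Any]], node_id: str) -> str | None:
--     """Return the next node id in the execution plan."""
--
--     ordered = [str(item["node_id"]) for item in selected_nodes]
--     if node_id not in ordered:
--         return None
--     idx = ordered.index(node_id)
--     if idx + 1 >= len(ordered):
--         return None
--     return ordered[idx + 1]
-- ===== SOURCE B (Python) =====
-- def _next_node_id(selected_nodes, node_id):
--     """Return the next node id in the execution plan.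
--
--     Single backward pass: walk the ordered ids from the end keeping the id
--     seen just after the current position (``follower``); every hit of
--     ``node_id`` overwrites ``result``, so the final value is the follower of
--     the FIRST occurrence (matching list.index), or None if absent/last.
--     """
--     ordered = [str(item["node_id"]) for item in selected_nodes]
--     result = None
--     follower = None
--     for x in reversed(ordered):
--         if x == node_id:
--             result = follower
--         follower = x
--     return result
-- ===== Notes on version B (the rewrite author's own statement) =====
-- stated objective: alternative
-- what changed: Replaces A's three staged passes (membership test, list.index, bounds-checked indexing) by one backward fold carrying a 'follower' accumulator; later (leftward) hits overwrite, so the first occurrence wins without any index arithmetic.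
import Mathlib
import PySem

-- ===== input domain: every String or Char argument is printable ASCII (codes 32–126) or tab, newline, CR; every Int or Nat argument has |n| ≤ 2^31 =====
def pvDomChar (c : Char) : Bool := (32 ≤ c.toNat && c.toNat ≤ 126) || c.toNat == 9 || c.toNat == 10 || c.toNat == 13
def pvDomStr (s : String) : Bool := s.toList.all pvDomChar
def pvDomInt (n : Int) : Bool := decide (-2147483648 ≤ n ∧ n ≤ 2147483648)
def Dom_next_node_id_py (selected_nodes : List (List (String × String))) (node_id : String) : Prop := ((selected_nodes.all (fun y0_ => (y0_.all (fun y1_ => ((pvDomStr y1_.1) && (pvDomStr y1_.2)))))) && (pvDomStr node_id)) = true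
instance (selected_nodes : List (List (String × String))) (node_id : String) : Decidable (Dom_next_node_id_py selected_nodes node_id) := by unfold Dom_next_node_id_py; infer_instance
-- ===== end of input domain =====

-- B replaces A's staged membership/index/bounds passes by one backward pass over the id list
-- carrying a 'follower' accumulator: an alternative decomposition of the same cost.

-- ===== PORT A =====
def next_node_id_py (selected_nodes : List (List (String × String))) (node_id : String) : Option String :=
  -- ordered = [str(item["node_id"]) for item in selected_nodes]; Pre_ guarantees the key is
  -- present, so the .getD "" default is never taken (Python raises KeyError there).
  let ordered := selected_nodes.map (fun item => ((PySem.Dict.ofList item).get? "node_id").getD "")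
  if ordered.contains node_id = false then none
  else match PySem.List.index? ordered node_id with
    | none => none   -- unreachable: node_id ∈ ordered in this branch
    | some idx => if ordered.length ≤ idx + 1 then none else ordered[idx + 1]?

-- ===== PORT B =====
def next_node_id_py_alt (selected_nodes : List (List (String × String))) (node_id : String) : Option String :=
  let ordered := selected_nodes.map (fun item => ((PySem.Dict.ofList item).get? "node_id").getD "")
  -- for x in reversed(ordered): if x == node_id: result = follower; follower = x
  (ordered.reverse.foldl
    (fun (st : Option String × Option String) x =>
      (if x = node_id then st.2 else st.1, some x))
    (none, none)).1

-- ===== PRECONDITION & SPEC =====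
-- Pre_ excludes inputs where some item lacks the key "node_id": Python A (and B) raise KeyError there.
def Pre_next_node_id_py (selected_nodes : List (List (String × String))) (node_id : String) : Prop :=
  ∀ item ∈ selected_nodes, "node_id" ∈ item.map Prod.fst
instance (selected_nodes : List (List (String × String))) (node_id : String) : Decidable (Pre_next_node_id_py selected_nodes node_id) := by unfold Pre_next_node_id_py; infer_instance
def pvWitness_next_node_id_py : (List (List (String × String))) × String :=
  ([[("node_id", "a")], [("node_id", "b")]], "a")

def Spec_next_node_id_py (selected_nodes : List (List (String × String))) (node_id : String) (out : Option String) : Prop := out = next_node_id_py_alt selected_nodes node_id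
instance (selected_nodes : List (List (String × String))) (node_id : String) (out : Option String) : Decidable (Spec_next_node_id_py selected_nodes node_id out) := by unfold Spec_next_node_id_py; infer_instance

-- ===== CLAIM (what is proved, stated in full; the proofs are below) =====
def Claim_equal_next_node_id_py : Prop := ∀ (selected_nodes : List (List (String × String))) (node_id : String), Dom_next_node_id_py selected_nodes node_id → Pre_next_node_id_py selected_nodes node_id → Spec_next_node_id_py selected_nodes node_id (next_node_id_py selected_nodes node_id)

-- ===== LEMMAS AND PROOFS =====

-- B's backward fold computes (A's index/bounds expression, l.head?): later (leftward) hits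
-- overwrite the first component, so the first occurrence wins.
theorem revfold_eq (nid : String) (l : List String) :
    l.reverse.foldl
      (fun (st : Option String × Option String) x =>
        (if x = nid then st.2 else st.1, some x)) (none, none)
      = ((match PySem.List.index? l nid with
          | none => none
          | some idx => if l.length ≤ idx + 1 then none else l[idx + 1]?), l.head?) := by
  rw [List.foldl_reverse]
  induction l with
  | nil => simp [PySem.List.index?]
  | cons h t ih =>
    simp only [List.foldr_cons, ih]
    by_cases hx : h = nid
    · subst hx
      rw [PySem.List.index?_cons_self]
      cases t <;> simp
    · have hne : h ≠ nid := hx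
      rw [PySem.List.index?_cons_of_ne _ hne]
      have hxb : ¬ (h = nid) := hx
      cases hidx : PySem.List.index? t nid with
      | none => simp [hxb]
      | some k =>
        simp only [Option.map_some, hxb, if_false, Prod.mk.injEq]
        refine ⟨?_, rfl⟩
        by_cases hb : t.length ≤ k + 1
        · have : (h :: t).length ≤ k + 1 + 1 := by simp; omega
          simp [hb]
        · have : ¬ (h :: t).length ≤ k + 1 + 1 := by simp at hb ⊢; omega
          simp [hb]

-- ===== VERDICT (by name: the statement is the Claim_ definition above) =====
theorem next_node_id_py_spec : Claim_equal_next_node_id_py := by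
  intro sn nid _ _
  unfold Spec_next_node_id_py next_node_id_py next_node_id_py_alt
  dsimp only
  set l := sn.map (fun item => ((PySem.Dict.ofList item).get? "node_id").getD "") with hl
  rw [revfold_eq]
  by_cases hc : l.contains nid = false
  · rw [if_pos hc]
    have hnone : PySem.List.index? l nid = none := by
      rw [PySem.List.index?_eq_none_iff]; simpa using hc
    rw [hnone]
  · rw [if_neg hc]
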